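-- pv_equiv track=rewrite | github.com/kvedes/mljuice | HandlingTimeDependentData/static_window.py | equi_dist_time_points
-- ===== SOURCE A (Python) =====
-- from math import ceil                                # Round up numbers
--
-- def equi_dist_time_points(start, end, step_size):
--     '''
--     This is a generator function which yields equidistant time points used for the static window fitting procedure
--     '''
--     # Calculate number of steps
--     n_steps = ceil((end-start)/step_size)
--
--     n = 0
--     while n < n_steps:
--         if n == n_steps - 1:
--             yield start + n * step_size, end
--         else:
--             yield start + n * step_size, start + (n+1) * step_size
--         n += 1
-- ===== SOURCE B (Python) =====
-- from math import ceil
--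
--
-- def equi_dist_time_points(start, end, step_size):
--     # Build the full boundary sequence once, then emit adjacent pairs uniformly
--     # (no special-case branch for the last interval inside the loop).
--     n_steps = ceil((end - start) / step_size)
--     boundaries = [start + n * step_size for n in range(n_steps)]
--     if n_steps > 0:
--         boundaries.append(end)
--     for left, right in zip(boundaries, boundaries[1:]):
--         yield left, right
-- ===== Notes on version B (the rewrite author's own statement) =====
-- stated objective: simpler
-- what changed: B precomputes the boundary list [start+n*step_size ...] plus end and emits adjacent pairs via one uniform zip, removing A's in-loop last-step branch and counter-driven while loop.
import Mathlib
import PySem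

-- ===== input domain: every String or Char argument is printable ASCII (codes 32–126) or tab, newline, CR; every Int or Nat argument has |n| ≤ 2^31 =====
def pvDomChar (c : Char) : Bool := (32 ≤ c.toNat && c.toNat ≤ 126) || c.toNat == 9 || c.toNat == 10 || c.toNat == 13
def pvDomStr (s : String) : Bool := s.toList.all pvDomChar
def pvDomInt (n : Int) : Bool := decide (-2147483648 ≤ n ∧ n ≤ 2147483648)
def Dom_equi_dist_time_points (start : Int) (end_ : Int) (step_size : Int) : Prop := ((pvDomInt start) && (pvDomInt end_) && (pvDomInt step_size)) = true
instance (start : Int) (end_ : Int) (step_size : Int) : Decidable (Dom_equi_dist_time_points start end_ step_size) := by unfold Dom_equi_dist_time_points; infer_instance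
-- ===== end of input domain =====

-- B builds the boundary list once and emits adjacent pairs with one uniform zip, removing A's in-loop last-step branch (objective: simpler).


-- ===== PORT A =====
-- Python computes ceil((end-start)/step_size) through float division; on Dom (|int| ≤ 2^31)
-- the quotient is far from any other integer relative to float precision, so it equals the
-- exact rational ceiling, ported as -((-(end-start)) // step_size) with Python floor division.
-- A's while loop over n with its last-iteration branch, fuel = number of remaining iterations.
def pvLoopA (start : Int) (end_ : Int) (step_size : Int) (n_steps : Int) (n : Int) : Nat → List (Int × Int)
  | 0 => []
  | fuel + 1 =>
    (if n = n_steps - 1 then (start + n * step_size, end_)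
     else (start + n * step_size, start + (n + 1) * step_size))
      :: pvLoopA start end_ step_size n_steps (n + 1) fuel

def equi_dist_time_points (start : Int) (end_ : Int) (step_size : Int) : List (Int × Int) :=
  let n_steps : Int := -(PySem.Int.floordiv (-(end_ - start)) step_size)
  pvLoopA start end_ step_size n_steps 0 n_steps.toNat

-- ===== PORT B =====
def equi_dist_time_points_alt (start : Int) (end_ : Int) (step_size : Int) : List (Int × Int) :=
  let n_steps : Int := -(PySem.Int.floordiv (-(end_ - start)) step_size)
  let boundaries : List Int :=
    ((List.range n_steps.toNat).map (fun (n : Nat) => start + (n : Int) * step_size))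
      ++ (if n_steps > 0 then [end_] else [])
  boundaries.zip boundaries.tail

-- ===== PRECONDITION & SPEC =====
-- Pre_ excludes exactly step_size = 0, on which Python A raises ZeroDivisionError.
def Pre_equi_dist_time_points (start : Int) (end_ : Int) (step_size : Int) : Prop := step_size ≠ 0
instance (start : Int) (end_ : Int) (step_size : Int) : Decidable (Pre_equi_dist_time_points start end_ step_size) := by unfold Pre_equi_dist_time_points; infer_instance
def pvWitness_equi_dist_time_points : Int × Int × Int := (0, 10, 3)

def Spec_equi_dist_time_points (start : Int) (end_ : Int) (step_size : Int) (out : List (Int × Int)) : Prop := out = equi_dist_time_points_alt start end_ step_size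
instance (start : Int) (end_ : Int) (step_size : Int) (out : List (Int × Int)) : Decidable (Spec_equi_dist_time_points start end_ step_size out) := by unfold Spec_equi_dist_time_points; infer_instance

-- ===== CLAIM (what is proved, stated in full; the proofs are below) =====
def Claim_equal_equi_dist_time_points : Prop := ∀ (start : Int) (end_ : Int) (step_size : Int), Dom_equi_dist_time_points start end_ step_size → Pre_equi_dist_time_points start end_ step_size → Spec_equi_dist_time_points start end_ step_size (equi_dist_time_points start end_ step_size)

-- ===== LEMMAS AND PROOFS =====

-- boundary suffix starting at index n with k interior points, followed by end_
def pvLB (start : Int) (end_ : Int) (step_size : Int) (n : Int) (k : Nat) : List Int :=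
  ((List.range k).map (fun (i : Nat) => start + (n + (i : Int)) * step_size)) ++ [end_]

lemma pvLB_succ (start end_ step_size n : Int) (k : Nat) :
    pvLB start end_ step_size n (k + 1)
      = (start + n * step_size) :: pvLB start end_ step_size (n + 1) k := by
  unfold pvLB
  rw [List.range_succ_eq_map, List.map_cons, List.map_map, List.cons_append]
  congr 1
  · push_cast; ring
  · congr 1
    apply List.map_congr_left
    intro i _
    simp only [Function.comp_apply]
    push_cast; ring

lemma pvLoopA_eq (start end_ step_size : Int) :
    ∀ (k : Nat) (n t : Int), t = n + (k : Int) → 1 ≤ k →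
      pvLoopA start end_ step_size t n k
        = (pvLB start end_ step_size n k).zip (pvLB start end_ step_size n k).tail := by
  intro k
  induction k with
  | zero => intro n t _ hk; omega
  | succ k ih =>
    intro n t ht _
    show (if n = t - 1 then (start + n * step_size, end_)
          else (start + n * step_size, start + (n + 1) * step_size))
            :: pvLoopA start end_ step_size t (n + 1) k = _
    cases k with
    | zero =>
      rw [if_pos (by push_cast at ht; omega)]
      simp [pvLoopA, pvLB]
    | succ m =>
      rw [if_neg (by push_cast at ht; omega)]
      rw [ih (n + 1) t (by push_cast at ht ⊢; omega) (by omega)]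
      rw [pvLB_succ start end_ step_size n (m + 1),
          pvLB_succ start end_ step_size (n + 1) m]
      simp [List.zip]

-- ===== VERDICT (by name: the statement is the Claim_ definition above) =====
theorem equi_dist_time_points_spec : Claim_equal_equi_dist_time_points := by
  intro start end_ step_size _ _
  unfold Spec_equi_dist_time_points equi_dist_time_points equi_dist_time_points_alt
  show pvLoopA start end_ step_size (-(PySem.Int.floordiv (-(end_ - start)) step_size)) 0
        (-(PySem.Int.floordiv (-(end_ - start)) step_size)).toNat
      = _
  generalize -(PySem.Int.floordiv (-(end_ - start)) step_size) = t
  show _ = (((List.range t.toNat).map (fun (n : Nat) => start + (n : Int) * step_size))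
              ++ (if t > 0 then [end_] else [])).zip
           (((List.range t.toNat).map (fun (n : Nat) => start + (n : Int) * step_size))
              ++ (if t > 0 then [end_] else [])).tail
  by_cases hpos : t > 0
  · have hL : pvLB start end_ step_size 0 t.toNat
        = ((List.range t.toNat).map (fun (n : Nat) => start + (n : Int) * step_size)) ++ [end_] := by
      simp [pvLB]
    rw [if_pos hpos, ← hL]
    exact pvLoopA_eq start end_ step_size t.toNat 0 t (by omega) (by omega)
  · have h0 : t.toNat = 0 := by omega
    rw [if_neg hpos, h0]
    simp [pvLoopA]
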